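-- pv_equiv track=rewrite | github.com/urupica/advent-of-code | 2024/14/solver.py | contains_christmas_tree
-- ===== SOURCE A (Python) =====
-- CHRISTMAS_TREE = """
-- ###############################
-- #                             #
-- #                             #
-- #                             #
-- #                             #
-- #              #              #
-- #             ###             #
-- #            #####            #
-- #           #######           #
-- #          #########          #
-- #            #####            #
-- #           #######           #
-- #          #########          #
-- #         ###########         #
-- #        #############        #
-- #          #########          #
-- #         ###########         #
-- #        #############        #
-- #       ###############       #
-- #      #################      #
-- #        #############        #
-- #       ###############       #
-- #      #################      #
-- #     ###################     #
-- #    #####################    #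
-- #             ###             #
-- #             ###             #
-- #             ###             #
-- #                             #
-- #                             #
-- #                             #
-- #                             #
-- ###############################
-- """.strip()
--
-- def contains_christmas_tree(positions, width, height):
--     tree_rows = CHRISTMAS_TREE.split("\n")
--     tree_height = len(tree_rows)
--     tree_width = len(tree_rows[0])
--     tree_row_positions = [
--         [x for x, c in enumerate(row) if c == "#"]
--         for y, row in enumerate(tree_rows)
--     ]
--
--     return any(
--         all(
--             {(a + x, b + y) for x in row}.issubset(positions)
--             for y, row in enumerate(tree_row_positions)
--         )
--         for b in range(height - (tree_height - 1))
--         for a in range(width - (tree_width - 1))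
--     )
-- ===== SOURCE B (Python) =====
-- CHRISTMAS_TREE = """
-- ###############################
-- #                             #
-- #                             #
-- #                             #
-- #                             #
-- #              #              #
-- #             ###             #
-- #            #####            #
-- #           #######           #
-- #          #########          #
-- #            #####            #
-- #           #######           #
-- #          #########          #
-- #         ###########         #
-- #        #############        #
-- #          #########          #
-- #         ###########         #
-- #        #############        #
-- #       ###############       #
-- #      #################      #
-- #        #############        #
-- #       ###############       #
-- #      #################      #
-- #     ###################     #
-- #    #####################    #
-- #             ###             #
-- #             ###             #
-- #             ###             #
-- #                             #
-- #                             #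
-- #                             #
-- #                             #
-- ###############################
-- """.strip()
--
--
-- def contains_christmas_tree(positions, width, height):
--     rows = CHRISTMAS_TREE.split("\n")
--     tree_height = len(rows)
--     tree_width = len(rows[0])
--     cells = [
--         (x, y)
--         for y, row in enumerate(rows)
--         for x, c in enumerate(row)
--         if c == "#"
--     ]
--     pts = set(positions)
--     # the tree's top-left corner cell (0, 0) is '#', so any placement's
--     # corner must itself be a robot position: only |pts| candidates.
--     return any(
--         0 <= a <= width - tree_width
--         and 0 <= b <= height - tree_height
--         and all((a + x, b + y) in pts for x, y in cells)
--         for a, b in pts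
--     )
-- ===== Notes on version B (the rewrite author's own statement) =====
-- stated objective: faster
-- what changed: Instead of testing the tree pattern at every (a,b) offset of the width x height grid, B anchors on the tree's top-left '#' cell: any valid placement's corner must itself be a robot position, so B only checks each robot position (via a set) as a candidate offset.
import Mathlib
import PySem

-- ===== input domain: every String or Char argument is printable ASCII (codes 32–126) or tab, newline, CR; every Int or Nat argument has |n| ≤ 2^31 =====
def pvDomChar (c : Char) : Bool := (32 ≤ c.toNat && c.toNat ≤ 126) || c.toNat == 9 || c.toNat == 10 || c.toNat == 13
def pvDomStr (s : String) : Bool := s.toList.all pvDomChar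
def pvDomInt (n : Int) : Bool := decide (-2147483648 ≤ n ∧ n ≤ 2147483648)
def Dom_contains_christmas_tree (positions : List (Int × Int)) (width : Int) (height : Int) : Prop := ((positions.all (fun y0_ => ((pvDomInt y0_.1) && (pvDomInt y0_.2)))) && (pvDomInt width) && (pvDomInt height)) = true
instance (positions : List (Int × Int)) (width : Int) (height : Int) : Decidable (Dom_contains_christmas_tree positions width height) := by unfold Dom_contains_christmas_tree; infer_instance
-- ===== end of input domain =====

-- B anchors placements on the tree's top-left '#' cell, so only robot positions are candidate
-- offsets (one bounds-and-membership check per robot) instead of A's scan of every (a, b) offset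
-- in the width × height grid; the return values are proved equal.

-- the module constant CHRISTMAS_TREE (a compile-time string literal, already stripped), stored as
-- its '\n'-split lines: both Pythons compute tree_rows = CHRISTMAS_TREE.split("\n"), a constant
def pvTreeRows : List String := ["###############################", "#                             #", "#                             #", "#                             #", "#                             #", "#              #              #", "#             ###             #", "#            #####            #", "#           #######           #", "#          #########          #", "#            #####            #", "#           #######           #", "#          #########          #", "#         ###########         #", "#        #############        #", "#          #########          #", "#         ###########         #", "#        #############        #", "#       ###############       #", "#      #################      #", "#        #############        #", "#       ###############       #", "#      #################      #", "#     ###################     #", "#    #####################    #", "#             ###             #", "#             ###             #", "#             ###             #", "#                             #", "#                             #", "#                             #", "#                             #", "###############################"]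

-- ===== PORT A =====
def contains_christmas_tree (positions : List (Int × Int)) (width : Int) (height : Int) : Bool :=
  let tree_rows := pvTreeRows
  let tree_height : Int := tree_rows.length
  let tree_width : Int := PySem.Str.len (PySem.List.pyGetD tree_rows 0 "")
  let tree_row_positions : List (List Int) :=
    (PySem.List.enumerate tree_rows 0).map (fun yr =>
      (PySem.List.enumerate yr.2.toList 0).filterMap (fun xc =>
        if xc.2 = '#' then some xc.1 else none))
  (PySem.List.pyRange 0 (height - (tree_height - 1)) 1).any (fun b =>
    (PySem.List.pyRange 0 (width - (tree_width - 1)) 1).any (fun a =>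
      (PySem.List.enumerate tree_row_positions 0).all (fun yr =>
        PySem.Set.issubset (PySem.Set.ofList (yr.2.map (fun x => (a + x, b + yr.1)))) positions)))

-- ===== PORT B =====
def contains_christmas_tree_alt (positions : List (Int × Int)) (width : Int) (height : Int) : Bool :=
  let rows := pvTreeRows
  let tree_height : Int := rows.length
  let tree_width : Int := PySem.Str.len (PySem.List.pyGetD rows 0 "")
  let cells : List (Int × Int) :=
    (PySem.List.enumerate rows 0).flatMap (fun yr =>
      (PySem.List.enumerate yr.2.toList 0).filterMap (fun xc =>
        if xc.2 = '#' then some (xc.1, yr.1) else none))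
  let pts : PySem.Set (Int × Int) := PySem.Set.ofList positions
  pts.any (fun p =>
    decide (0 ≤ p.1) && decide (p.1 ≤ width - tree_width) &&
    decide (0 ≤ p.2) && decide (p.2 ≤ height - tree_height) &&
    cells.all (fun c => PySem.Set.contains pts (p.1 + c.1, p.2 + c.2)))

-- ===== PRECONDITION & SPEC =====
def Spec_contains_christmas_tree (positions : List (Int × Int)) (width : Int) (height : Int) (out : Bool) : Prop := out = contains_christmas_tree_alt positions width height
instance (positions : List (Int × Int)) (width : Int) (height : Int) (out : Bool) : Decidable (Spec_contains_christmas_tree positions width height out) := by unfold Spec_contains_christmas_tree; infer_instance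

-- ===== CLAIM (what is proved, stated in full; the proofs are below) =====
def Claim_equal_contains_christmas_tree : Prop := ∀ (positions : List (Int × Int)) (width : Int) (height : Int), Dom_contains_christmas_tree positions width height → Spec_contains_christmas_tree positions width height (contains_christmas_tree positions width height)

-- ===== LEMMAS AND PROOFS =====

-- ===== VERDICT (by name: the statement is the Claim_ definition above) =====
theorem contains_christmas_tree_spec : Claim_equal_contains_christmas_tree := by
  intro positions width height _
  unfold Spec_contains_christmas_tree contains_christmas_tree contains_christmas_tree_alt
  have h0 : ((0:Int),(0:Int)) ∈ (PySem.List.enumerate pvTreeRows 0).flatMap (fun yr => (PySem.List.enumerate yr.2.toList 0).filterMap (fun xc => if xc.2 = '#' then some (xc.1, yr.1) else none)) := by decide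
  revert h0
  generalize pvTreeRows = rows
  intro h0
  rw [Bool.eq_iff_iff]
  simp only [List.any_eq_true, List.all_eq_true, PySem.List.mem_pyRange_one,
    PySem.Set.issubset_iff, PySem.Set.mem_ofList, PySem.Set.contains_iff,
    List.mem_map, List.mem_flatMap, List.mem_filterMap, PySem.List.mem_enumerate_iff,
    Bool.and_eq_true, decide_eq_true_eq, List.getElem_map, PySem.List.getElem_enumerate,
    List.length_map, PySem.List.length_enumerate]
  constructor
  · rintro ⟨b, ⟨hb0, hbH⟩, a, ⟨ha0, haW⟩, hall⟩
    have key : ∀ (k : Nat), k < rows.length → ∀ v ∈ List.filterMap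
        (fun xc => if xc.2 = '#' then some xc.1 else none)
        (PySem.List.enumerate rows[k]!.toList), (a + v, b + (k : Int)) ∈ positions := by
      intro k hk v hv
      have hg : rows[k]! = rows[k] := getElem!_pos rows k hk
      have := hall ((0 : Int) + (k : Int),
          List.filterMap (fun xc => if xc.2 = '#' then some xc.1 else none)
            (PySem.List.enumerate rows[k].toList 0)) ⟨k, hk, rfl⟩
          (a + v, b + ((0 : Int) + (k : Int))) ⟨v, by rw [hg] at hv; exact hv, rfl⟩
      simpa using this
    -- extract from h0 that (0, 0) is a tree cell: its row index k must be 0, its column 0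
    obtain ⟨yr, hyr, hmem⟩ := List.mem_flatMap.mp h0
    rw [PySem.List.mem_enumerate_iff] at hyr
    obtain ⟨k, hk, rfl⟩ := hyr
    obtain ⟨xc, hxc, hif⟩ := List.mem_filterMap.mp hmem
    by_cases hsharp : xc.2 = '#'
    · rw [if_pos hsharp] at hif
      have hx1 : xc.1 = 0 ∧ (0 : Int) + (k : Int) = 0 := by
        constructor <;> · have := Option.some.inj hif; simp_all [Prod.ext_iff]
      have hk0 : (k : Int) = 0 := by omega
      have hv0 : (0 : Int) ∈ List.filterMap (fun xc => if xc.2 = '#' then some xc.1 else none)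
          (PySem.List.enumerate rows[k]!.toList) := by
        rw [getElem!_pos rows k hk]
        exact List.mem_filterMap.mpr ⟨xc, hxc, by rw [if_pos hsharp, hx1.1]⟩
      have hab : (a, b) ∈ positions := by
        have := key k hk 0 hv0
        simpa [hk0] using this
      refine ⟨(a, b), hab, ⟨⟨⟨ha0, by omega⟩, hb0⟩, by omega⟩, ?_⟩
      rintro x1 ⟨aa, ⟨k2, hk2, rfl⟩, a1, ⟨j, hj, rfl⟩, hif2⟩
      by_cases hs2 : rows[k2].toList[j] = '#'
      · simp only [hs2, if_pos] at hif2
        obtain rfl := Option.some.inj hif2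
        have hvj : ((0 : Int) + (j : Int)) ∈ List.filterMap
            (fun xc => if xc.2 = '#' then some xc.1 else none)
            (PySem.List.enumerate rows[k2]!.toList) := by
          rw [getElem!_pos rows k2 hk2]
          refine List.mem_filterMap.mpr ⟨((0 : Int) + (j : Int), rows[k2].toList[j]), ?_, by rw [if_pos hs2]⟩
          rw [PySem.List.mem_enumerate_iff]
          exact ⟨j, hj, rfl⟩
        have := key k2 hk2 _ hvj
        simpa using this
      · simp [hs2] at hif2
    · rw [if_neg hsharp] at hif; exact absurd hif (by simp)
  · rintro ⟨p, hp, ⟨⟨⟨h1, h2⟩, h3⟩, h4⟩, hall⟩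
    refine ⟨p.2, ⟨h3, by omega⟩, p.1, ⟨h1, by omega⟩, ?_⟩
    rintro x2 ⟨k, hk, rfl⟩ x3 ⟨v, hv, rfl⟩
    obtain ⟨xc, hxc, hif⟩ := List.mem_filterMap.mp hv
    rw [PySem.List.mem_enumerate_iff] at hxc
    obtain ⟨j, hj, rfl⟩ := hxc
    by_cases hs : rows[k].toList[j] = '#'
    · rw [if_pos hs] at hif
      obtain rfl := Option.some.inj hif
      have := hall ((0 : Int) + (j : Int), (0 : Int) + (k : Int))
        ⟨((0 : Int) + (k : Int), rows[k]), ⟨k, hk, rfl⟩,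
         ((0 : Int) + (j : Int), rows[k].toList[j]), ⟨j, hj, rfl⟩, by rw [if_pos hs]⟩
      simpa using this
    · rw [if_neg hs] at hif; exact absurd hif (by simp)
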